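-- pv_equiv track=rewrite | github.com/PatilHiteshB/Competetive | Python/CarpetIntoBox/CarpetIntoBox.py | carpetBox
-- ===== SOURCE A (Python) =====
-- def carpetBox(A,B,C,D):
--     #code here
--
--     answer1 = answer2 = 0
--
--     Lt = A
--     Bt = B
--
--     while Lt > C:
--         Lt //= 2
--         answer1 += 1
--
--     while Bt > D:
--         Bt //= 2
--         answer1 += 1
--
--     Lt = B
--     Bt = A
--
--     while Lt > C:
--         Lt //= 2
--         answer2 += 1
--
--     while Bt > D:
--         Bt //= 2
--         answer2 += 1
--
--
--
--     return min(answer1, answer2)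
-- ===== SOURCE B (Python) =====
-- def carpetBox(A, B, C, D):
--     # Closed form: number of floor-halvings to bring x down to <= t
--     # is the bit length of x // (t + 1); no loops needed.
--     def h(x, t):
--         return 0 if x <= t else (x // (t + 1)).bit_length()
--     return min(h(A, C) + h(B, D), h(B, C) + h(A, D))
-- ===== Notes on version B (the rewrite author's own statement) =====
-- stated objective: alternative
-- what changed: Each while-loop that repeatedly halves a side is replaced by the closed form (x // (t+1)).bit_length(), so B is loop-free arithmetic; Pre_ excludes exactly the inputs (negative box side with a larger carpet side) where A's while-loop never terminates.
import Mathlib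
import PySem

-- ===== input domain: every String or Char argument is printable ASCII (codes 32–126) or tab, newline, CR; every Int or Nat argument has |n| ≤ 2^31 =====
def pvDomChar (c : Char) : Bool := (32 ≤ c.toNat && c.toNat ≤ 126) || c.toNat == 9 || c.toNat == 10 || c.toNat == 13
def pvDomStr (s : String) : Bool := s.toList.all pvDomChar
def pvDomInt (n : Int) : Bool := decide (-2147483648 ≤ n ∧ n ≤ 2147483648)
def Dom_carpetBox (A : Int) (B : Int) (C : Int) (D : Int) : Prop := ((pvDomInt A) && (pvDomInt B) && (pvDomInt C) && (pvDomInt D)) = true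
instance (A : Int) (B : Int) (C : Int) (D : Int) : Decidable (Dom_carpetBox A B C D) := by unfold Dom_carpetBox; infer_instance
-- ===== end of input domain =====

-- B replaces each halving while-loop of A by the closed form (x // (t+1)).bit_length(); Pre_ excludes
-- exactly the inputs on which A's while-loops never terminate (a negative target below a larger side).


-- ===== PORT A =====
-- 'while Lt > t: Lt //= 2; cnt += 1'; the fuel (64) only makes the loop total in Lean —
-- under Pre_carpetBox and Dom_carpetBox the loop stops long before the fuel runs out.
def pvWhileHalve : Nat → Int → Int → Int → Int
  | 0, _, _, cnt => cnt
  | f + 1, x, t, cnt =>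
      if x > t then pvWhileHalve f (PySem.Int.floordiv x 2) t (cnt + 1) else cnt

def carpetBox (A : Int) (B : Int) (C : Int) (D : Int) : Int :=
  let answer1 := pvWhileHalve 64 A C 0
  let answer1 := pvWhileHalve 64 B D answer1
  let answer2 := pvWhileHalve 64 B C 0
  let answer2 := pvWhileHalve 64 A D answer2
  min answer1 answer2

-- ===== PORT B =====
-- h(x, t) = 0 if x <= t else (x // (t+1)).bit_length()
def pvHalve (x t : Int) : Int :=
  if x ≤ t then 0 else (PySem.Int.bitLength (PySem.Int.floordiv x (t + 1)) : Int)

def carpetBox_alt (A : Int) (B : Int) (C : Int) (D : Int) : Int :=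
  min (pvHalve A C + pvHalve B D) (pvHalve B C + pvHalve A D)

-- ===== PRECONDITION & SPEC =====
-- Pre_ excludes exactly the inputs on which A never returns: with a negative target C (resp. D)
-- and some side above it, A's while-loop halves forever (floor division is fixed at 0 or -1 above
-- a negative target), so A diverges there; on every input where A returns, Pre_ holds.
def Pre_carpetBox (A : Int) (B : Int) (C : Int) (D : Int) : Prop :=
  (0 ≤ C ∨ (A ≤ C ∧ B ≤ C)) ∧ (0 ≤ D ∨ (B ≤ D ∧ A ≤ D))
instance (A : Int) (B : Int) (C : Int) (D : Int) : Decidable (Pre_carpetBox A B C D) := by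
  unfold Pre_carpetBox; infer_instance

def pvWitness_carpetBox : Int × Int × Int × Int := (100, 37, 5, 2)

def Spec_carpetBox (A : Int) (B : Int) (C : Int) (D : Int) (out : Int) : Prop := out = carpetBox_alt A B C D
instance (A : Int) (B : Int) (C : Int) (D : Int) (out : Int) : Decidable (Spec_carpetBox A B C D out) := by unfold Spec_carpetBox; infer_instance

-- ===== CLAIM (what is proved, stated in full; the proofs are below) =====
def Claim_equal_carpetBox : Prop := ∀ (A : Int) (B : Int) (C : Int) (D : Int), Dom_carpetBox A B C D → Pre_carpetBox A B C D → Spec_carpetBox A B C D (carpetBox A B C D)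

-- ===== LEMMAS AND PROOFS =====

-- One halving step of the closed form: for 0 ≤ t < x, the count is 1 + the count after x //= 2.
lemma pvHalve_step (x t : Int) (ht : 0 ≤ t) (hxt : t < x) :
    pvHalve x t = pvHalve (PySem.Int.floordiv x 2) t + 1 := by
  unfold pvHalve
  rw [if_neg (not_le.2 hxt)]
  by_cases h2 : PySem.Int.floordiv x 2 ≤ t
  · rw [if_pos h2]
    have hx2 : x < (t + 1) * 2 :=
      (PySem.Int.floordiv_lt_iff_lt_mul (by norm_num)).1
        (show PySem.Int.floordiv x 2 < t + 1 by omega)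
    have hq : PySem.Int.floordiv x (t + 1) = 1 := by
      rw [PySem.Int.floordiv_eq_iff_of_pos (by omega)]
      constructor <;> omega
    rw [hq]
    decide
  · rw [if_neg h2]
    have hq : 0 < PySem.Int.floordiv x (t + 1) := by
      have := (PySem.Int.le_floordiv_iff_mul_le (show (0:Int) < t + 1 by omega)).2
        (show (1:Int) * (t + 1) ≤ x by omega)
      omega
    rw [PySem.Int.bitLength_of_pos hq]
    have hcomm : PySem.Int.floordiv (PySem.Int.floordiv x (t + 1)) 2
        = PySem.Int.floordiv (PySem.Int.floordiv x 2) (t + 1) := by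
      show ((x.fdiv (t + 1)).fdiv 2) = ((x.fdiv 2).fdiv (t + 1))
      rw [Int.fdiv_fdiv_eq_fdiv_mul x (by omega) (by omega),
          Int.fdiv_fdiv_eq_fdiv_mul x (by omega) (by omega), mul_comm]
    rw [hcomm]
    push_cast
    ring

-- With a nonnegative target and enough fuel, the while-loop computes c + closed form.
lemma pvWhileHalve_eq (f : Nat) (x t c : Int) (ht : 0 ≤ t)
    (hx : x < (t + 1) * 2 ^ f) :
    pvWhileHalve f x t c = c + pvHalve x t := by
  induction f generalizing x c with
  | zero =>
    have hxt : x ≤ t := by simpa using hx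
    simp [pvWhileHalve, pvHalve, hxt]
  | succ f ih =>
    unfold pvWhileHalve
    by_cases hxt : x > t
    · rw [if_pos hxt]
      have hb : PySem.Int.floordiv x 2 < (t + 1) * 2 ^ f := by
        rw [PySem.Int.floordiv_lt_iff_lt_mul (by omega)]
        have : (t + 1) * 2 ^ (f + 1) = (t + 1) * 2 ^ f * 2 := by ring
        omega
      rw [ih (PySem.Int.floordiv x 2) (c + 1) hb, pvHalve_step x t ht hxt]
      ring
    · rw [if_neg hxt]
      have : pvHalve x t = 0 := by unfold pvHalve; rw [if_pos (by omega)]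
      omega

-- If the side is already within the target, the loop never runs and the closed form is 0.
lemma pvWhileHalve_done (f : Nat) (x t c : Int) (hxt : x ≤ t) :
    pvWhileHalve f x t c = c + pvHalve x t := by
  have h0 : pvHalve x t = 0 := by unfold pvHalve; rw [if_pos hxt]
  cases f with
  | zero => simp [pvWhileHalve, h0]
  | succ f => unfold pvWhileHalve; rw [if_neg (by omega)]; omega

lemma pvWhileHalve_closed (x t c : Int) (hx : x ≤ 2147483648)
    (hpre : 0 ≤ t ∨ x ≤ t) :
    pvWhileHalve 64 x t c = c + pvHalve x t := by
  rcases hpre with ht | hxt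
  · refine pvWhileHalve_eq 64 x t c ht ?_
    have h1 : (1 : Int) * 2 ^ 64 ≤ (t + 1) * 2 ^ 64 := by
      have : (0:Int) < 2 ^ 64 := by positivity
      nlinarith
    have : (1 : Int) * 2 ^ 64 = 18446744073709551616 := by norm_num
    omega
  · exact pvWhileHalve_done 64 x t c hxt

-- ===== VERDICT (by name: the statement is the Claim_ definition above) =====
theorem carpetBox_spec : Claim_equal_carpetBox := by
  intro A B C D hdom hpre
  obtain ⟨hC, hD⟩ := hpre
  have hdom' : A ≤ 2147483648 ∧ B ≤ 2147483648 := by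
    unfold Dom_carpetBox pvDomInt at hdom
    simp only [Bool.and_eq_true, decide_eq_true_eq] at hdom
    omega
  show carpetBox A B C D = carpetBox_alt A B C D
  have h1 := pvWhileHalve_closed A C 0 hdom'.1 (by omega)
  have h2 : ∀ c, pvWhileHalve 64 B D c = c + pvHalve B D :=
    fun c => pvWhileHalve_closed B D c hdom'.2 (by omega)
  have h3 := pvWhileHalve_closed B C 0 hdom'.2 (by omega)
  have h4 : ∀ c, pvWhileHalve 64 A D c = c + pvHalve A D :=
    fun c => pvWhileHalve_closed A D c hdom'.1 (by omega)
  simp only [carpetBox, carpetBox_alt, h1, h2, h3, h4]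
  omega
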